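-- pv_equiv track=rewrite | github.com/EdwardChhun/CISP430 | week6/hotSprings.py | ifSpringsAndCountsAgree
-- ===== SOURCE A (Python) =====
-- def ifSpringsAndCountsAgree(row) -> bool:
--     """Function that takes in a row indicating a row of "springs" and
--     the its count such that "." means operational and "#" means damaged
--
--     Ex: #.#.### 1,1,3
--
--     Args:
--         row (str): takes in a row of springs and counts
--
--     Returns:
--         bool: returns (true) if the springs and counts agree, (false) if they don't
--     """
--
--     # Split the row of springs and count into 2 separate strings
--     damaged, count = row.split(" ", 1)
--     # Keeping current counts of the damaged springs
--     # to later verify if matches the input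
--     currentDamaged = 0
--     currentCount = []
--
--     for i in damaged:
--         if i == "#":
--             currentDamaged += 1
--         else:
--             if currentDamaged:
--                 currentCount.append(currentDamaged)
--             currentDamaged = 0
--
--     if currentDamaged:
--         currentCount.append(currentDamaged)
--
--     # If the current count is equal to the original count
--     return ",".join(map(str,currentCount)) == count
-- ===== SOURCE B (Python) =====
-- def ifSpringsAndCountsAgree(row) -> bool:
--     """Run-skipping scan: find each maximal run of '#' with a two-pointer
--     sweep and compare the joined run lengths with the given counts."""
--     damaged, count = row.split(" ", 1)
--     lengths = []
--     i, n = 0, len(damaged)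
--     while i < n:
--         if damaged[i] != '#':
--             i += 1
--             continue
--         j = i + 1
--         while j < n and damaged[j] == '#':
--             j += 1
--         lengths.append(str(j - i))
--         i = j
--     return ",".join(lengths) == count
-- ===== Notes on version B (the rewrite author's own statement) =====
-- stated objective: alternative
-- what changed: Replaced the per-character accumulator loop (running '#' counter flushed on each non-'#' and once at the end) with a two-pointer run-skipping scan that locates each maximal '#' run and records its length directly.
import Mathlib
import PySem

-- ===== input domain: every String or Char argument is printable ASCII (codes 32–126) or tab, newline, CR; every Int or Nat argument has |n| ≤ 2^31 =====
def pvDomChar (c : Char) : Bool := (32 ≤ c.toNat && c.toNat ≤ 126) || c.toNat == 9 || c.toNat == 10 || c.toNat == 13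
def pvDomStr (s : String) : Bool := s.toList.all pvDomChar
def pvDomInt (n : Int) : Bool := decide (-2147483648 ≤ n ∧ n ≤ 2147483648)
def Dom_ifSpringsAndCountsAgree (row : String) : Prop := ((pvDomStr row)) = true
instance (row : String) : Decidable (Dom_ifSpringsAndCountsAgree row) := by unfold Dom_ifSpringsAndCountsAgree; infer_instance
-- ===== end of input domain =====

-- B replaces A's per-character accumulator loop by a two-pointer run-skipping scan
-- over the maximal '#' runs (objective: alternative, same cost).

-- ===== PORT A =====
-- one step of A's for-loop over the characters of `damaged`
def pvStepA (st : Int × List Int) (i : Char) : Int × List Int :=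
  if i == '#' then (st.1 + 1, st.2)
  else (0, if st.1 ≠ 0 then st.2 ++ [st.1] else st.2)

def ifSpringsAndCountsAgree (row : String) : Bool :=
  match PySem.Str.splitMax? row " " 1 with
  | some [damaged, count] =>
      let st := damaged.toList.foldl pvStepA (0, [])
      let currentCount := if st.1 ≠ 0 then st.2 ++ [st.1] else st.2
      PySem.Str.join "," (currentCount.map PySem.Int.toStr) == count
  | _ => false   -- unreachable under Pre_: row.split(" ", 1) yields two pieces

-- ===== PORT B =====
-- Source B's while loop: skip non-'#', then sweep j over the maximal '#' run, record j - i
def pvRunsB (cs : List Char) : List Int :=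
  match cs with
  | [] => []
  | c :: rest =>
      if c == '#' then
        (((rest.takeWhile (· == '#')).length + 1 : Int))
          :: pvRunsB (rest.dropWhile (· == '#'))
      else pvRunsB rest
termination_by cs.length
decreasing_by
  · simp only [List.length_cons]
    exact Nat.lt_succ_of_le (List.length_dropWhile_le _ _)
  · simp

def ifSpringsAndCountsAgree_alt (row : String) : Bool :=
  let pieces := (PySem.Str.splitMax? row " " 1).getD []
  if pieces.length == 2 then
    PySem.Str.join "," ((pvRunsB (pieces.getD 0 "").toList).map PySem.Int.toStr)
      == pieces.getD 1 ""
  else false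

-- ===== PRECONDITION & SPEC =====
-- Pre_ excludes rows without a space: there `row.split(" ", 1)` unpacking raises ValueError in A.
def Pre_ifSpringsAndCountsAgree (row : String) : Prop := ' ' ∈ row.toList
instance (row : String) : Decidable (Pre_ifSpringsAndCountsAgree row) := by
  unfold Pre_ifSpringsAndCountsAgree; infer_instance

def pvWitness_ifSpringsAndCountsAgree : String := "#.### 1,3"

def Spec_ifSpringsAndCountsAgree (row : String) (out : Bool) : Prop := out = ifSpringsAndCountsAgree_alt row
instance (row : String) (out : Bool) : Decidable (Spec_ifSpringsAndCountsAgree row out) := by unfold Spec_ifSpringsAndCountsAgree; infer_instance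

-- ===== CLAIM (what is proved, stated in full; the proofs are below) =====
def Claim_equal_ifSpringsAndCountsAgree : Prop := ∀ (row : String), Dom_ifSpringsAndCountsAgree row → Pre_ifSpringsAndCountsAgree row → Spec_ifSpringsAndCountsAgree row (ifSpringsAndCountsAgree row)

-- ===== LEMMAS AND PROOFS =====

-- A's flushed accumulator, as a recursion carrying the pending run length `cur`
def pvRunsFrom (cur : Int) (cs : List Char) : List Int :=
  match cs with
  | [] => if cur ≠ 0 then [cur] else []
  | c :: t =>
      if c == '#' then pvRunsFrom (cur + 1) t
      else (if cur ≠ 0 then [cur] else []) ++ pvRunsFrom 0 t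

theorem foldA_eq_runsFrom (cs : List Char) : ∀ (cur : Int) (acc : List Int),
    (let st := cs.foldl pvStepA (cur, acc);
     if st.1 ≠ 0 then st.2 ++ [st.1] else st.2) = acc ++ pvRunsFrom cur cs := by
  induction cs with
  | nil =>
      intro cur acc
      simp only [List.foldl, pvRunsFrom]
      split_ifs <;> simp
  | cons c t ih =>
      intro cur acc
      simp only [List.foldl, pvRunsFrom, pvStepA]
      by_cases h : c == '#'
      · simp only [h, if_pos rfl, ite_true]
        exact ih (cur + 1) acc
      · simp only [h, Bool.false_eq_true, ite_false]
        rw [ih 0 _]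
        split_ifs <;> simp

theorem runsFrom_spec (cs : List Char) :
    pvRunsFrom 0 cs = pvRunsB cs ∧
    ∀ cur : Int, 0 < cur →
      pvRunsFrom cur cs =
        (cur + ((cs.takeWhile (· == '#')).length : Int)) :: pvRunsB (cs.dropWhile (· == '#')) := by
  induction cs with
  | nil =>
      refine ⟨by simp [pvRunsFrom, pvRunsB], ?_⟩
      intro cur hcur
      simp only [pvRunsFrom, if_pos (by omega : ¬cur = 0)]
      simp [pvRunsB]
  | cons c t ih =>
      by_cases h : c == '#'
      · constructor
        · rw [pvRunsFrom, pvRunsB.eq_def]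
          simp only [h, ite_true]
          rw [show (0:Int) + 1 = 1 from by norm_num, ih.2 1 (by norm_num)]
          refine congrArg₂ List.cons (by push_cast; ring) rfl
        · intro cur hcur
          rw [pvRunsFrom]
          simp only [h, ite_true]
          rw [ih.2 (cur + 1) (by omega)]
          refine congrArg₂ List.cons ?_ (by simp [List.dropWhile, h])
          simp only [List.takeWhile, h, ite_true, List.length_cons]
          push_cast
          ring
      · constructor
        · rw [pvRunsFrom, pvRunsB.eq_def]
          simp only [h, Bool.false_eq_true, ite_false, ne_eq, not_true_eq_false,
            List.nil_append]
          simpa using ih.1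
        · intro cur hcur
          rw [pvRunsFrom, pvRunsB.eq_def]
          simp only [h, Bool.false_eq_true, ite_false, (by omega : cur ≠ 0), ne_eq, not_false_eq_true,
            ite_true, List.takeWhile, List.dropWhile]
          rw [ih.1, if_pos (by omega : ¬cur = 0)]
          simp

-- ===== VERDICT (by name: the statement is the Claim_ definition above) =====
theorem ifSpringsAndCountsAgree_spec : Claim_equal_ifSpringsAndCountsAgree := by
  intro row _ _
  unfold Spec_ifSpringsAndCountsAgree ifSpringsAndCountsAgree ifSpringsAndCountsAgree_alt
  cases hsp : PySem.Str.splitMax? row " " 1 with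
  | none => rfl
  | some l =>
      match l with
      | [] => rfl
      | [_] => rfl
      | _ :: _ :: _ :: _ => rfl
      | [damaged, count] =>
          simp only [Option.getD_some, List.length_cons, List.length_nil, List.getD,
            List.getElem?_cons_zero, List.getElem?_cons_succ, Option.getD_some,
            Nat.reduceAdd, beq_self_eq_true, if_true]
          have h1 := foldA_eq_runsFrom damaged.toList 0 []
          simp only [List.nil_append] at h1
          rw [h1, (runsFrom_spec damaged.toList).1]
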